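-- pv_equiv track=rewrite | github.com/16010948/Algorithm | Programmers/blind7.py | solution
-- ===== SOURCE A (Python) =====
-- class Trie:
--     class Node:
--         def __init__(self, key, depth, count=0, data=None):
--             self.key = key
--             self.depth = depth
--             self.data = data
--             self.count = 0
--             self.children = {}
--
--     def __init__(self):
--         self.root = self.Node(None, 0)
--
--     def insert(self, string):
--         cur_node = self.root
--         for char in string:
--             cur_node.count += 1
--             if char not in cur_node.children:
--                 cur_node.children[char] = self.Node(char, cur_node.depth + 1)
--             else:
--                 cur_node.children[char].count += 1
--             cur_node = cur_node.children[char]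
--         cur_node.data = string
--
--     def traversal_minimum_character(self, string):
--         cur_node = self.root
--
--         for char in string:
--             if char in cur_node.children:
--                 cur_node = cur_node.children[char]
--                 if cur_node.count == 1:
--                     break
--
--         return cur_node.depth
--
-- def solution(words):
--     answer = 0
--
--     trie = Trie()
--     for word in words:
--         trie.insert(word)
--
--     for word in words:
--         answer += trie.traversal_minimum_character(word)
--
--     return answer
-- ===== SOURCE B (Python) =====
-- def _lcp(a, b):
--     k = 0
--     while k < len(a) and k < len(b) and a[k] == b[k]:
--         k += 1
--     return k
--
-- def solution(words):
--     ans = 0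
--     for i in range(len(words)):
--         w = words[i]
--         others = words[:i] + words[i+1:]
--         m = 0
--         for v in others:
--             m = max(m, _lcp(w, v))
--         ans += min(len(w), m + 1)
--     return ans
-- ===== Notes on version B (the rewrite author's own statement) =====
-- stated objective: simpler
-- what changed: Replaces the trie (insert all words, then walk each word until a count-1 node) by the direct formula: each word contributes min(len(w), 1 + max longest-common-prefix with any other word), computed by pairwise LCP scans.
import Mathlib
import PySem

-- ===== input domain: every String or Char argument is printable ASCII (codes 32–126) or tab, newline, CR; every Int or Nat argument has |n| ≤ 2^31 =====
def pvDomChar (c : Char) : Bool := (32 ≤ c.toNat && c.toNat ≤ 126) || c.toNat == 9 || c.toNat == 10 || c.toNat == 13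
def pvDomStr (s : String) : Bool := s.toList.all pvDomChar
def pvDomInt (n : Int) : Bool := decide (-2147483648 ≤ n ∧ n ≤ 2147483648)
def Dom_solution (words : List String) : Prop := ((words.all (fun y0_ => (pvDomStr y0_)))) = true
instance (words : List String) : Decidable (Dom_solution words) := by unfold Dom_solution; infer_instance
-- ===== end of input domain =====

-- B replaces A's trie with the direct per-word formula min(len(w), 1 + max LCP with any other word); objective: simpler.

-- ===== PORT A =====
-- The Python trie is a pointer structure; we key each node by its path from the root
-- (children dict membership 'c in node.children' = presence of the key path++[c]).
-- Node fields 'key', 'depth' and 'data' are written but never read by `solution`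
-- (depth is tracked by the traversal itself), so only `count` is stored per node;
-- the root's count lives in `rootCount`.
structure PyTrie where
  rootCount : Int
  nodes : PySem.Dict (List Char) Int
deriving Repr, DecidableEq

-- 'cur_node.count += 1' (root's count is separate, as the root has no path key)
def trieIncr (t : PyTrie) (p : List Char) : PyTrie :=
  if p = [] then { t with rootCount := t.rootCount + 1 }
  else { t with nodes := t.nodes.modify p 0 (· + 1) }

-- 'if char not in cur_node.children: children[char] = Node(char, depth+1)  else: children[char].count += 1'
def trieChild (t : PyTrie) (child : List Char) : PyTrie :=
  if t.nodes.contains child then { t with nodes := t.nodes.modify child 0 (· + 1) }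
  else { t with nodes := t.nodes.insert child 0 }

-- one iteration of insert's 'for char in string' (state: current node path, trie)
def trieInsertStep (s : List Char × PyTrie) (c : Char) : List Char × PyTrie :=
  (s.1 ++ [c], trieChild (trieIncr s.2 s.1) (s.1 ++ [c]))

def trieInsert (t : PyTrie) (w : List Char) : PyTrie :=
  (w.foldl trieInsertStep ([], t)).2

-- 'traversal_minimum_character': walk the word; on a child hit, step down and break if count == 1
def trieTrav (t : PyTrie) : List Char → List Char → Int → Int
  | _, [], depth => depth
  | path, c :: rest, depth =>
    let child := path ++ [c]
    if t.nodes.contains child then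
      if t.nodes.getD child 0 = 1 then depth + 1
      else trieTrav t child rest (depth + 1)
    else trieTrav t path rest depth

def solution (words : List String) : Int :=
  let trie := words.foldl (fun t w => trieInsert t w.toList) ⟨0, PySem.Dict.empty⟩
  words.foldl (fun answer w => answer + trieTrav trie [] w.toList 0) 0

-- ===== PORT B =====
-- '_lcp': the while loop over positions, as structural recursion on the two char lists (exact)
def lcpB : List Char → List Char → Int
  | a :: as, b :: bs => if a = b then 1 + lcpB as bs else 0
  | _, _ => 0

def solution_alt (words : List String) : Int :=
  (PySem.List.pyRange 0 (words.length) 1).foldl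
    (fun ans i =>
      let w := PySem.List.pyGetD words i ""
      let others := PySem.List.slice words none (some i) ++ PySem.List.slice words (some (i + 1)) none
      let m := others.foldl (fun m v => max m (lcpB w.toList v.toList)) 0
      ans + min (PySem.Str.len w) (m + 1)) 0

-- ===== PRECONDITION & SPEC =====
def Spec_solution (words : List String) (out : Int) : Prop := out = solution_alt words
instance (words : List String) (out : Int) : Decidable (Spec_solution words out) := by unfold Spec_solution; infer_instance

-- ===== CLAIM (what is proved, stated in full; the proofs are below) =====
def Claim_equal_solution : Prop := ∀ (words : List String), Dom_solution words → Spec_solution words (solution words)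

-- ===== LEMMAS AND PROOFS =====

theorem lcpB_nonneg (a b : List Char) : 0 ≤ lcpB a b := by
  induction a generalizing b with
  | nil => simp [lcpB]
  | cons x as ih =>
    cases b with
    | nil => simp [lcpB]
    | cons y bs =>
      simp only [lcpB]
      split
      · have := ih bs; omega
      · omega

theorem lcpB_le_left (a b : List Char) : lcpB a b ≤ (a.length : Int) := by
  induction a generalizing b with
  | nil => simp [lcpB]
  | cons x as ih =>
    cases b with
    | nil => simp [lcpB]; positivity
    | cons y bs =>
      simp only [lcpB, List.length_cons]
      split
      · have := ih bs; push_cast; omega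
      · push_cast; positivity

theorem prefix_iff_lcp (a b : List Char) (d : Nat) (hd : d ≤ a.length) :
    (a.take d).isPrefixOf b = true ↔ (d : Int) ≤ lcpB a b := by
  induction d generalizing a b with
  | zero => simpa using lcpB_nonneg a b
  | succ d ih =>
    cases a with
    | nil => simp at hd
    | cons x as =>
      cases b with
      | nil =>
        simp only [lcpB, List.take_succ_cons, List.isPrefixOf]
        push_cast
        simp
      | cons y bs =>
        by_cases h : x = y
        · subst h
          have hih := ih as bs (by simpa using hd)
          simp only [lcpB, List.take_succ_cons, List.isPrefixOf, beq_self_eq_true,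
            Bool.true_and, hih]
          generalize lcpB as bs = k
          push_cast
          omega
        · have h0 := lcpB_nonneg as bs
          simp only [lcpB, List.take_succ_cons, List.isPrefixOf, if_neg h]
          simp [h]

theorem foldl_max_proj_mem (l : List String) (f : String → Int) (a : Int) :
    l.foldl (fun m v => max m (f v)) a = a ∨ ∃ v ∈ l, l.foldl (fun m v => max m (f v)) a = f v := by
  induction l generalizing a with
  | nil => simp
  | cons x xs ih =>
    simp only [List.foldl_cons]
    rcases ih (max a (f x)) with h | ⟨v, hv, he⟩
    · rcases max_cases a (f x) with ⟨he, _⟩ | ⟨he, _⟩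
      · left; rw [h, he]
      · right; exact ⟨x, by simp, by rw [h, he]⟩
    · right; exact ⟨v, by simp [hv], he⟩
theorem incr_other (t : PyTrie) (q p : List Char) (h : p ≠ q) :
    (trieIncr t q).nodes.contains p = t.nodes.contains p ∧
    (trieIncr t q).nodes.getD p 0 = t.nodes.getD p 0 := by
  simp only [trieIncr]
  split <;> simp [PySem.Dict.contains_modify, PySem.Dict.getD_modify, h]

theorem t1_at_q (t : PyTrie) (q : List Char) (c : Char) (hq : q ≠ []) :
    ((trieInsertStep (q, t) c).2.nodes.contains q = true) ∧
    ((trieInsertStep (q, t) c).2.nodes.getD q 0 = t.nodes.getD q 0 + 1) := by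
  have hne : q ≠ q ++ [c] := by simp
  simp only [trieInsertStep, trieChild, trieIncr, if_neg hq]
  by_cases h : (t.nodes.modify q 0 (· + 1)).contains (q ++ [c]) <;>
    simp [h, PySem.Dict.contains_modify, PySem.Dict.getD_modify, PySem.Dict.contains_insert,
      PySem.Dict.getD_insert, hne]

theorem t1_at_child (t : PyTrie) (q : List Char) (c : Char) :
    ((trieInsertStep (q, t) c).2.nodes.contains (q ++ [c]) = true) ∧
    ((trieInsertStep (q, t) c).2.nodes.getD (q ++ [c]) 0 =
      (if t.nodes.contains (q ++ [c]) then t.nodes.getD (q ++ [c]) 0 else -1) + 1) := by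
  obtain ⟨hc, hg⟩ := incr_other t q (q ++ [c]) (by simp)
  simp only [trieInsertStep, trieChild, hc]
  by_cases h : t.nodes.contains (q ++ [c]) <;>
    simp [h, PySem.Dict.contains_modify, PySem.Dict.contains_insert_self, hg]

theorem t1_at_other (t : PyTrie) (q : List Char) (c : Char) (p : List Char)
    (h1 : p ≠ q) (h2 : p ≠ q ++ [c]) :
    ((trieInsertStep (q, t) c).2.nodes.contains p = t.nodes.contains p) ∧
    ((trieInsertStep (q, t) c).2.nodes.getD p 0 = t.nodes.getD p 0) := by
  obtain ⟨hc, hg⟩ := incr_other t q p h1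
  simp only [trieInsertStep, trieChild]
  by_cases h : (trieIncr t q).nodes.contains (q ++ [c]) <;>
    simp [h, PySem.Dict.contains_modify, PySem.Dict.getD_modify, PySem.Dict.contains_insert,
      PySem.Dict.getD_insert, h2, hc, hg]
theorem insert_fold_char (rest : List Char) : ∀ (q : List Char) (t : PyTrie) (p : List Char), p ≠ [] →
    ((p = q ∧ rest ≠ []) →
      ((rest.foldl trieInsertStep (q, t)).2.nodes.contains p = true ∧
       (rest.foldl trieInsertStep (q, t)).2.nodes.getD p 0 = t.nodes.getD p 0 + 1)) ∧
    ((∃ r, r ≠ [] ∧ r <+: rest ∧ p = q ++ r) →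
      ((rest.foldl trieInsertStep (q, t)).2.nodes.contains p = true ∧
       (rest.foldl trieInsertStep (q, t)).2.nodes.getD p 0 =
         (if t.nodes.contains p then t.nodes.getD p 0 else -1) + (if p = q ++ rest then 1 else 2))) ∧
    ((¬(p = q ∧ rest ≠ []) ∧ ¬(∃ r, r ≠ [] ∧ r <+: rest ∧ p = q ++ r)) →
      ((rest.foldl trieInsertStep (q, t)).2.nodes.contains p = t.nodes.contains p ∧
       (rest.foldl trieInsertStep (q, t)).2.nodes.getD p 0 = t.nodes.getD p 0)) := by
  induction rest with
  | nil =>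
    intro q t p hp
    refine ⟨?_, ?_, ?_⟩
    · rintro ⟨-, h⟩; exact absurd rfl h
    · rintro ⟨r, hr, hpre, -⟩; exact absurd (List.prefix_nil.mp hpre) hr
    · intro _; exact ⟨rfl, rfl⟩
  | cons c rest' ih =>
    intro q t p hp
    have hstep : (c :: rest').foldl trieInsertStep (q, t)
        = rest'.foldl trieInsertStep (q ++ [c], (trieInsertStep (q, t) c).2) := by
      simp [List.foldl_cons, trieInsertStep]
    obtain ⟨IH1, IH2, IH3⟩ := ih (q ++ [c]) (trieInsertStep (q, t) c).2 p hp
    rw [hstep]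
    refine ⟨?_, ?_, ?_⟩
    · -- p = q, first step increments it, nothing later touches it
      rintro ⟨rfl, -⟩
      have hz1 : ¬(p = p ++ [c] ∧ rest' ≠ []) := by
        rintro ⟨h, -⟩; simp at h
      have hz2 : ¬(∃ r, r ≠ [] ∧ r <+: rest' ∧ p = p ++ [c] ++ r) := by
        rintro ⟨r, hr, -, h⟩
        have := congrArg List.length h; simp at this
      obtain ⟨C3, G3⟩ := IH3 ⟨hz1, hz2⟩
      obtain ⟨Cq, Gq⟩ := t1_at_q t p c hp
      exact ⟨by rw [C3, Cq], by rw [G3, Gq]⟩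
    · -- p = q ++ r for a nonempty prefix r of c :: rest'
      rintro ⟨r, hr, hpre, rfl⟩
      cases r with
      | nil => exact absurd rfl hr
      | cons c' r' =>
        obtain ⟨rfl, hpre'⟩ := List.cons_prefix_cons.mp hpre
        by_cases hr' : r' = []
        · subst hr'
          by_cases hrest : rest' = []
          · subst hrest
            have hz1 : ¬(q ++ [c'] = q ++ [c'] ∧ ([] : List Char) ≠ []) := by simp
            have hz2 : ¬(∃ r, r ≠ [] ∧ r <+: ([] : List Char) ∧ q ++ [c'] = q ++ [c'] ++ r) := by
              rintro ⟨r, hr2, hpre2, -⟩; exact absurd (List.prefix_nil.mp hpre2) hr2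
            obtain ⟨C3, G3⟩ := IH3 ⟨hz1, hz2⟩
            obtain ⟨Cc, Gc⟩ := t1_at_child t q c'
            refine ⟨by rw [C3, Cc], ?_⟩
            rw [G3, Gc]
            simp
          · have hz1 : (q ++ [c'] = q ++ [c'] ∧ rest' ≠ []) := ⟨rfl, hrest⟩
            obtain ⟨C1, G1⟩ := IH1 hz1
            obtain ⟨Cc, Gc⟩ := t1_at_child t q c'
            refine ⟨C1, ?_⟩
            rw [G1, Gc]
            have hne : ¬(q ++ [c'] = q ++ c' :: rest') := by simp [hrest]
            simp only [if_neg hne]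
            ring
        · -- r' nonempty: deeper zone, first step does not touch p
          have hz2 : (∃ r, r ≠ [] ∧ r <+: rest' ∧ q ++ c' :: r' = q ++ [c'] ++ r) := by
            exact ⟨r', hr', hpre', by simp⟩
          obtain ⟨C2, G2⟩ := IH2 hz2
          have hne1 : q ++ c' :: r' ≠ q := by simp
          have hne2 : q ++ c' :: r' ≠ q ++ [c'] := by simp [hr']
          obtain ⟨Co, Go⟩ := t1_at_other t q c' (q ++ c' :: r') hne1 hne2
          refine ⟨C2, ?_⟩
          rw [G2, Co, Go]
          have heq : (q ++ c' :: r' = q ++ [c'] ++ rest') ↔ (q ++ c' :: r' = q ++ c' :: rest') := by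
            simp
          simp only [heq]
    · -- untouched zone
      rintro ⟨hn1, hn2⟩
      have hpq : p ≠ q := by
        intro h; exact hn1 ⟨h, by simp⟩
      have hpc : p ≠ q ++ [c] := by
        intro h; exact hn2 ⟨[c], by simp, ⟨rest', rfl⟩, h⟩
      have hz1 : ¬(p = q ++ [c] ∧ rest' ≠ []) := fun ⟨h, _⟩ => hpc h
      have hz2 : ¬(∃ r, r ≠ [] ∧ r <+: rest' ∧ p = q ++ [c] ++ r) := by
        rintro ⟨r, hr, hpre, h⟩
        exact hn2 ⟨c :: r, by simp, List.cons_prefix_cons.mpr ⟨rfl, hpre⟩, by simpa using h⟩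
      obtain ⟨C3, G3⟩ := IH3 ⟨hz1, hz2⟩
      obtain ⟨Co, Go⟩ := t1_at_other t q c p hpq hpc
      exact ⟨by rw [C3, Co], by rw [G3, Go]⟩
theorem insert_one (t : PyTrie) (w p : List Char) (hp : p ≠ []) :
    ((trieInsert t w).nodes.contains p = (t.nodes.contains p || p.isPrefixOf w)) ∧
    ((trieInsert t w).nodes.getD p 0 =
      if p.isPrefixOf w then
        (if t.nodes.contains p then t.nodes.getD p 0 else -1) + (if p = w then 1 else 2)
      else t.nodes.getD p 0) := by
  obtain ⟨-, Z2, Z3⟩ := insert_fold_char w [] t p hp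
  by_cases hpre : p.isPrefixOf w = true
  · have hz : ∃ r, r ≠ [] ∧ r <+: w ∧ p = [] ++ r :=
      ⟨p, hp, List.isPrefixOf_iff_prefix.mp hpre, by simp⟩
    obtain ⟨C2, G2⟩ := Z2 hz
    refine ⟨?_, ?_⟩
    · simp [trieInsert, C2, hpre]
    · simpa [trieInsert, hpre] using G2
  · have hz : ¬(∃ r, r ≠ [] ∧ r <+: w ∧ p = [] ++ r) := by
      rintro ⟨r, hr, hpr, hpe⟩
      rw [List.nil_append] at hpe
      subst hpe
      exact hpre (List.isPrefixOf_iff_prefix.mpr hpr)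
    obtain ⟨C3, G3⟩ := Z3 ⟨by simp [hp], hz⟩
    have hf : p.isPrefixOf w = false := by rw [Bool.not_eq_true] at hpre; exact hpre
    refine ⟨?_, ?_⟩
    · show (w.foldl trieInsertStep ([], t)).2.nodes.contains p = _
      rw [C3, hf, Bool.or_false]
    · show (w.foldl trieInsertStep ([], t)).2.nodes.getD p 0 = _
      rw [G3, hf]
      simp

theorem trie_inv (ws : List (List Char)) (p : List Char) (hp : p ≠ []) :
    ((ws.foldl trieInsert ⟨0, PySem.Dict.empty⟩).nodes.contains p
        = decide (0 < ws.countP (fun v => p.isPrefixOf v))) ∧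
    (0 < ws.countP (fun v => p.isPrefixOf v) →
      (ws.foldl trieInsert ⟨0, PySem.Dict.empty⟩).nodes.getD p 0
        = 2 * (ws.countP (fun v => p.isPrefixOf v) : Int) - (ws.count p : Int) - 1) := by
  induction ws using List.reverseRecOn with
  | nil => simp [PySem.Dict.contains_empty]
  | append_singleton ws w ih =>
    obtain ⟨ihC, ihG⟩ := ih
    have hfold : ((ws ++ [w]).foldl trieInsert (⟨0, PySem.Dict.empty⟩ : PyTrie))
        = trieInsert (ws.foldl trieInsert ⟨0, PySem.Dict.empty⟩) w := by
      simp [List.foldl_append]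
    obtain ⟨C1, G1⟩ := insert_one (ws.foldl trieInsert ⟨0, PySem.Dict.empty⟩) w p hp
    have hcountP : (ws ++ [w]).countP (fun v => p.isPrefixOf v)
        = ws.countP (fun v => p.isPrefixOf v) + (if p.isPrefixOf w then 1 else 0) := by
      simp [List.countP_append, List.countP_cons]
    have hcount : (ws ++ [w]).count p = ws.count p + (if p = w then 1 else 0) := by
      by_cases h : p = w
      · simp [List.count_append, h]
      · have h' : ¬ w = p := fun e => h e.symm
        simp [List.count_append, h, h']
    have hec : ws.count p ≤ ws.countP (fun v => p.isPrefixOf v) := by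
      rw [List.count_eq_countP]
      apply List.countP_mono_left
      intro v _ hv
      have : v = p := eq_of_beq hv
      subst this
      exact List.isPrefixOf_iff_prefix.mpr (List.prefix_refl v)
    rw [hfold]
    by_cases hpre : p.isPrefixOf w = true
    · refine ⟨?_, ?_⟩
      · rw [C1, ihC, hcountP]
        simp [hpre]
      · intro _
        rw [G1, if_pos hpre, hcountP, if_pos hpre, hcount, ihC]
        by_cases hc : 0 < ws.countP (fun v => p.isPrefixOf v)
        · rw [ihG hc]
          have hcd : decide (0 < ws.countP (fun v => p.isPrefixOf v)) = true := by simpa using hc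
          rw [hcd, if_pos rfl]
          by_cases hw : p = w
          · rw [if_pos hw, if_pos hw]; push_cast; ring
          · rw [if_neg hw, if_neg hw]; push_cast; ring
        · have hcd : decide (0 < ws.countP (fun v => p.isPrefixOf v)) = false := by simpa using hc
          have hc0 : ws.countP (fun v => p.isPrefixOf v) = 0 := by omega
          have he0 : ws.count p = 0 := by omega
          rw [hcd, if_neg (by simp)]
          by_cases hw : p = w
          · rw [if_pos hw, if_pos hw, hc0, he0]; norm_num
          · rw [if_neg hw, if_neg hw, hc0, he0]; norm_num
    · have hcP : (ws ++ [w]).countP (fun v => p.isPrefixOf v) = ws.countP (fun v => p.isPrefixOf v) := by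
        rw [hcountP]; simp [hpre]
      have hcw : ¬ p = w := by
        rintro rfl
        exact hpre (List.isPrefixOf_iff_prefix.mpr (List.prefix_refl p))
      have hcE : (ws ++ [w]).count p = ws.count p := by
        rw [hcount]; simp [hcw]
      refine ⟨?_, ?_⟩
      · rw [C1, ihC, hcP]
        simp [hpre]
      · intro h
        rw [hcP] at h
        rw [G1, if_neg hpre, hcP, hcE]
        exact ihG h
theorem core_trav (words : List String) (i : Nat) (hi : i < words.length) :
    trieTrav (words.foldl (fun t w => trieInsert t w.toList) ⟨0, PySem.Dict.empty⟩)
        [] (words[i].toList) 0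
      = min ((words[i].toList.length : Int))
          (((words.take i ++ words.drop (i + 1)).foldl
              (fun m v => max m (lcpB words[i].toList v.toList)) 0) + 1) := by
  set wl := words[i].toList with hwl
  set O := words.take i ++ words.drop (i + 1) with hO
  set Mi := O.foldl (fun m v => max m (lcpB wl v.toList)) 0 with hMi
  set ws := words.map String.toList with hws
  have hfold : words.foldl (fun t w => trieInsert t w.toList) (⟨0, PySem.Dict.empty⟩ : PyTrie)
      = ws.foldl trieInsert ⟨0, PySem.Dict.empty⟩ := by rw [hws, List.foldl_map]
  rw [hfold]
  set t0 := ws.foldl trieInsert ⟨0, PySem.Dict.empty⟩ with ht0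
  -- facts about the running max Mi
  have hM0 : 0 ≤ Mi := (PySem.List.le_foldl_max_int O (fun v => lcpB wl v.toList) 0).1
  have hMub : ∀ v ∈ O, lcpB wl v.toList ≤ Mi := (PySem.List.le_foldl_max_int O (fun v => lcpB wl v.toList) 0).2
  have hMmem : Mi = 0 ∨ ∃ v ∈ O, Mi = lcpB wl v.toList := foldl_max_proj_mem O (fun v => lcpB wl v.toList) 0
  have hMle : Mi ≤ (wl.length : Int) := by
    rcases hMmem with h | ⟨v, _, he⟩
    · rw [h]; exact Int.natCast_nonneg _
    · rw [he]; exact lcpB_le_left wl v.toList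
  -- counting bridges
  have hsplit : words = words.take i ++ words[i] :: words.drop (i + 1) := by
    conv_lhs => rw [← List.take_append_drop i words, List.drop_eq_getElem_cons hi]
  have hcount_split : ∀ q : String → Bool,
      words.countP q = O.countP q + (if q words[i] then 1 else 0) := by
    intro q
    rw [hO, List.countP_append]
    conv_lhs => rw [hsplit]
    rw [List.countP_append, List.countP_cons]
    omega
  have hbridge : ∀ p : List Char,
      ws.countP (fun v => p.isPrefixOf v) = O.countP (fun v => p.isPrefixOf v.toList)
        + (if p.isPrefixOf wl then 1 else 0) := by
    intro p
    rw [hws, List.countP_map]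
    simp only [Function.comp_def]
    rw [hcount_split (fun s => p.isPrefixOf s.toList)]
  have hbridgeE : ∀ p : List Char,
      ws.count p = O.countP (fun v => v.toList == p) + (if wl == p then 1 else 0) := by
    intro p
    rw [List.count_eq_countP, hws, List.countP_map]
    simp only [Function.comp_def]
    rw [hcount_split (fun s => s.toList == p)]
  have hcnt : ∀ d : Nat, d ≤ wl.length →
      ws.countP (fun v => (wl.take d).isPrefixOf v)
        = O.countP (fun v => (wl.take d).isPrefixOf v.toList) + 1 := by
    intro d hd
    rw [hbridge]
    have : (wl.take d).isPrefixOf wl = true :=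
      List.isPrefixOf_iff_prefix.mpr (List.take_prefix d wl)
    rw [this]
    simp
  have hEO_le_K : ∀ d : Nat, O.countP (fun v => v.toList == wl.take d)
      ≤ O.countP (fun v => (wl.take d).isPrefixOf v.toList) := by
    intro d
    apply List.countP_mono_left
    intro v _ hv
    have : v.toList = wl.take d := eq_of_beq hv
    rw [this]
    exact List.isPrefixOf_iff_prefix.mpr (List.prefix_refl _)
  have hK0 : ∀ d : Nat, d ≤ wl.length → Mi < (d : Int) →
      O.countP (fun v => (wl.take d).isPrefixOf v.toList) = 0 := by
    intro d hd hM
    apply List.countP_eq_zero.mpr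
    intro v hv hpre
    have h1 : (d : Int) ≤ lcpB wl v.toList := (prefix_iff_lcp wl v.toList d hd).mp hpre
    have h2 := hMub v hv
    omega
  have hK1 : ∀ d : Nat, 1 ≤ d → d ≤ wl.length → (d : Int) ≤ Mi →
      0 < O.countP (fun v => (wl.take d).isPrefixOf v.toList) := by
    intro d h1 hd hM
    rcases hMmem with h | ⟨v, hv, he⟩
    · omega
    · apply List.countP_pos_iff.mpr
      refine ⟨v, hv, ?_⟩
      apply (prefix_iff_lcp wl v.toList d hd).mpr
      rw [← he]
      exact hM
  have htake_ne : ∀ d : Nat, d < wl.length → wl.take d ≠ wl := by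
    intro d hd h
    have := congrArg List.length h
    rw [List.length_take] at this
    omega
  have htake_nonnil : ∀ d : Nat, 1 ≤ d → d ≤ wl.length → wl.take d ≠ [] := by
    intro d h1 hd h
    have := congrArg List.length h
    rw [List.length_take, List.length_nil] at this
    omega
  -- the traversal, from depth d with the remaining characters of wl
  have T : ∀ (rest : List Char) (d : Nat), rest = wl.drop d → d ≤ wl.length →
      ((d : Int) ≤ Mi ∨ (d = wl.length ∧ (wl.length : Int) ≤ Mi + 1)) →
      trieTrav t0 (wl.take d) rest (d : Int) = min (wl.length : Int) (Mi + 1) := by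
    intro rest
    induction rest with
    | nil =>
      intro d hdrop hdle hdisj
      have hdl : wl.length ≤ d := by
        have := congrArg List.length hdrop
        simp [List.length_drop] at this
        omega
      have hlenle : (wl.length : Int) ≤ Mi + 1 := by
        rcases hdisj with h | ⟨-, h⟩
        · have : (wl.length : Int) ≤ (d : Int) := by exact_mod_cast hdl
          omega
        · exact h
      rw [trieTrav, min_eq_left hlenle]
      have : d = wl.length := le_antisymm hdle hdl
      rw [this]
    | cons c2 rest2 ihT =>
      intro d hdrop hdle hdisj
      have hdlt : d < wl.length := by
        rcases Nat.lt_or_ge d wl.length with h | h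
        · exact h
        · rw [List.drop_eq_nil_of_le h] at hdrop
          cases hdrop
      rw [List.drop_eq_getElem_cons hdlt] at hdrop
      obtain ⟨hc2, hrest2⟩ := List.cons.injEq .. |>.mp hdrop
      have hchild : wl.take d ++ [c2] = wl.take (d + 1) := by
        rw [hc2]
        have := List.take_concat_get (l := wl) hdlt
        rwa [List.concat_eq_append] at this
      have hp_ne : wl.take (d + 1) ≠ [] := htake_nonnil (d + 1) (by omega) (by omega)
      obtain ⟨IC, IG⟩ := trie_inv ws (wl.take (d + 1)) hp_ne
      rw [← ht0] at IC IG
      have hcnt' : ws.countP (fun v => (wl.take (d + 1)).isPrefixOf v)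
          = O.countP (fun v => (wl.take (d + 1)).isPrefixOf v.toList) + 1 :=
        hcnt (d + 1) (by omega)
      have hcont : t0.nodes.contains (wl.take (d + 1)) = true := by
        rw [IC, hcnt']
        simp
      have hval : t0.nodes.getD (wl.take (d + 1)) 0
          = 2 * ((O.countP (fun v => (wl.take (d + 1)).isPrefixOf v.toList) : Int) + 1)
            - (ws.count (wl.take (d + 1)) : Int) - 1 := by
        rw [IG (by rw [hcnt']; omega), hcnt']
        push_cast
        ring
      rw [trieTrav]
      simp only [hchild, hcont, if_true]
      by_cases hMd : ((d : Int) + 1 ≤ Mi)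
      · have hKpos : 0 < O.countP (fun v => (wl.take (d + 1)).isPrefixOf v.toList) :=
          hK1 (d + 1) (by omega) (by omega) (by push_cast; omega)
        by_cases hdl2 : d + 1 = wl.length
        · have hlen_le : (wl.length : Int) ≤ Mi + 1 := by
            have : ((d : Int) + 1) = (wl.length : Int) := by exact_mod_cast congrArg (Nat.cast : Nat → Int) hdl2
            omega
          split
          · rw [min_eq_left hlen_le]
            exact_mod_cast congrArg (Nat.cast : Nat → Int) hdl2
          · exact ihT (d + 1) hrest2 (by omega) (Or.inr ⟨hdl2, hlen_le⟩)
        · have hne_take : wl.take (d + 1) ≠ wl := htake_ne (d + 1) (by omega)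
          have hcount_e : ws.count (wl.take (d + 1))
              = O.countP (fun v => v.toList == wl.take (d + 1)) := by
            rw [hbridgeE]
            have : (wl == wl.take (d + 1)) = false := by
              simp [Ne.symm hne_take]
            rw [this]
            simp
          have hval1 : ¬ (t0.nodes.getD (wl.take (d + 1)) 0 = 1) := by
            rw [hval, hcount_e]
            have h1 := hEO_le_K (d + 1)
            omega
          rw [if_neg hval1]
          exact ihT (d + 1) hrest2 (by omega) (Or.inl (by push_cast; omega))
      · have hdM : (d : Int) = Mi := by
          rcases hdisj with h | ⟨h, -⟩
          · omega
          · omega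
        have hK0' : O.countP (fun v => (wl.take (d + 1)).isPrefixOf v.toList) = 0 :=
          hK0 (d + 1) (by omega) (by push_cast; omega)
        have hEO0 : O.countP (fun v => v.toList == wl.take (d + 1)) = 0 :=
          Nat.le_zero.mp (hK0' ▸ hEO_le_K (d + 1))
        by_cases hdl2 : d + 1 = wl.length
        · have hpeq : wl.take (d + 1) = wl := by
            rw [hdl2]
            exact List.take_length
          have hcount_e : ws.count (wl.take (d + 1))
              = O.countP (fun v => v.toList == wl.take (d + 1)) + 1 := by
            rw [hbridgeE]
            have : (wl == wl.take (d + 1)) = true := by simp [hpeq]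
            rw [this]
            simp
          have hval1 : ¬ (t0.nodes.getD (wl.take (d + 1)) 0 = 1) := by
            rw [hval, hcount_e, hK0', hEO0]
            norm_num
          rw [if_neg hval1]
          have hlen_le : (wl.length : Int) ≤ Mi + 1 := by
            have : ((d : Int) + 1) = (wl.length : Int) := by exact_mod_cast congrArg (Nat.cast : Nat → Int) hdl2
            omega
          exact ihT (d + 1) hrest2 (by omega) (Or.inr ⟨hdl2, hlen_le⟩)
        · have hne_take : wl.take (d + 1) ≠ wl := htake_ne (d + 1) (by omega)
          have hcount_e : ws.count (wl.take (d + 1))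
              = O.countP (fun v => v.toList == wl.take (d + 1)) := by
            rw [hbridgeE]
            have : (wl == wl.take (d + 1)) = false := by
              simp [Ne.symm hne_take]
            rw [this]
            simp
          have hval1 : t0.nodes.getD (wl.take (d + 1)) 0 = 1 := by
            rw [hval, hcount_e, hK0', hEO0]
            norm_num
          rw [if_pos hval1]
          have hmin : min (wl.length : Int) (Mi + 1) = Mi + 1 := by
            apply min_eq_right
            have : ((d : Int) + 1) ≤ (wl.length : Int) := by exact_mod_cast hdlt
            omega
          rw [hmin]
          omega
  have := T wl 0 (by simp) (by omega) (Or.inl hM0)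
  simpa using this
theorem final_equiv (words : List String) : solution words = solution_alt words := by
  simp only [solution, solution_alt]
  rw [PySem.List.foldl_add words (fun w => trieTrav
      (words.foldl (fun t w => trieInsert t w.toList) ⟨0, PySem.Dict.empty⟩) [] w.toList 0) 0]
  rw [PySem.List.foldl_add (PySem.List.pyRange 0 (words.length) 1)
      (fun i => min (PySem.Str.len (PySem.List.pyGetD words i ""))
      (((PySem.List.slice words none (some i) ++ PySem.List.slice words (some (i + 1)) none).foldl
        (fun m v => max m (lcpB (PySem.List.pyGetD words i "").toList v.toList)) 0) + 1)) 0]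
  rw [zero_add, zero_add]
  have hmap : words.map (fun w => trieTrav
      (words.foldl (fun t w => trieInsert t w.toList) ⟨0, PySem.Dict.empty⟩) [] w.toList 0)
      = ((PySem.List.pyRange 0 (words.length) 1).map (fun j => PySem.List.pyGetD words j "")).map
        (fun w => trieTrav
          (words.foldl (fun t w => trieInsert t w.toList) ⟨0, PySem.Dict.empty⟩) [] w.toList 0) := by
    rw [PySem.List.map_pyGetD_pyRange_zero']
  rw [hmap, List.map_map]
  apply congrArg List.sum
  apply List.map_congr_left
  intro j hj
  obtain ⟨h0, h1⟩ := PySem.List.mem_pyRange_one.mp hj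
  have hjk : j = ((j.toNat : Nat) : Int) := by omega
  have hk : j.toNat < words.length := by omega
  have hg : PySem.List.pyGetD words j "" = words[j.toNat] :=
    PySem.List.pyGetD_eq_getElem words "" h0 h1
  simp only [Function.comp_def, hg]
  rw [PySem.List.slice_to words h0, PySem.List.slice_from words (by omega : (0:Int) ≤ j + 1)]
  have ht1 : (j + 1).toNat = j.toNat + 1 := by omega
  rw [ht1, PySem.Str.len_eq]
  exact core_trav words j.toNat hk

-- ===== VERDICT (by name: the statement is the Claim_ definition above) =====
theorem solution_spec : Claim_equal_solution := by
  intro words _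
  show solution words = solution_alt words
  exact final_equiv words
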